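-- pv_equiv track=rewrite | github.com/wc005/AEP | AER/preprocess/Dataset_user.py | flatten_and_rank
-- ===== SOURCE A (Python) =====
-- def flatten_and_rank(lst):
--     # 展平二维列表并记录原始索引
--     flat_list = [(value, (i, j)) for i, sublist in enumerate(lst) for j, value in enumerate(sublist)]
--
--     # 对展平后的列表进行排序
--     sorted_flat_list = sorted(flat_list, key=lambda x: x[0])
--
--     # 创建一个字典来映射每个值到其排序后的序号（从1开始）
--     rank_dict = {value: rank + 1 for rank, (value, _) in enumerate(sorted_flat_list)}
--
--     # 构建一个新的二维列表，用排序后的序号替换原始值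
--     ranked_2d_list = []
--     for i, sublist in enumerate(lst):
--         ranked_sublist = []
--         for j, value in enumerate(sublist):
--             # 使用原始索引来找到正确的排序序号
--             original_index = (i, j)
--             # 注意：这里我们其实不需要找到原始索引，因为rank_dict已经通过值映射了序号
--             # 但为了展示如何关联原始位置和排序后的序号，我保留了这一步
--             ranked_value = rank_dict[value]
--             ranked_sublist.append(ranked_value)
--         ranked_2d_list.append(ranked_sublist)
--
--     return ranked_2d_list
-- ===== SOURCE B (Python) =====
-- def flatten_and_rank(lst):
--     # Rank of a value = number of flattened values <= it (A's last-wins dict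
--     # over a stable sort yields exactly this count).  Count occurrences once,
--     # sort only the distinct values, and take a running prefix sum.
--     counts = {}
--     for row in lst:
--         for v in row:
--             counts[v] = counts.get(v, 0) + 1
--     cum = {}
--     total = 0
--     for v in sorted(counts):
--         total += counts[v]
--         cum[v] = total
--     return [[cum[v] for v in row] for row in lst]
-- ===== Notes on version B (the rewrite author's own statement) =====
-- stated objective: faster
-- what changed: B drops the positional index, the full stable sort and the last-wins rank dict: it counts occurrences in one pass, sorts only the distinct values, and maps each value to a running prefix sum of counts (= number of flattened values <= it).
import Mathlib
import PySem

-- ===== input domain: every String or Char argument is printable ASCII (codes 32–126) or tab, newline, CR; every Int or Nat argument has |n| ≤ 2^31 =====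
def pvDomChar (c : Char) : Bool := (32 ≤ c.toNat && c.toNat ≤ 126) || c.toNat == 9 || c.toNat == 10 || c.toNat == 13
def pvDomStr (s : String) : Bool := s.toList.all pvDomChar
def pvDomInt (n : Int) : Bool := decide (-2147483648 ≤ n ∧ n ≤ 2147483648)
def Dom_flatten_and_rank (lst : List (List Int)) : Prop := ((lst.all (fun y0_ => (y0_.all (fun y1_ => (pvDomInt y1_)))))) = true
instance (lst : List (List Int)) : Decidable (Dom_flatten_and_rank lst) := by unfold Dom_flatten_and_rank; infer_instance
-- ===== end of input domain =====

-- B replaces A's positional index + full stable sort + last-wins rank dict by an occurrence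
-- count, a sort of the distinct values only, and a prefix-sum map (alternative; A is total, no Pre_).

-- ===== PORT A =====
def flatten_and_rank (lst : List (List Int)) : List (List Int) :=
  -- flat_list = [(value, (i, j)) for i, sublist in enumerate(lst) for j, value in enumerate(sublist)]
  let flat_list : List (Int × Int × Int) :=
    (PySem.List.enumerate lst).flatMap (fun p =>
      (PySem.List.enumerate p.2).map (fun q => (q.2, p.1, q.1)))
  -- sorted_flat_list = sorted(flat_list, key=lambda x: x[0])
  let sorted_flat_list := PySem.List.sorted flat_list (fun x => x.1) false
  -- rank_dict = {value: rank + 1 for rank, (value, _) in enumerate(sorted_flat_list)}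
  let rank_dict : PySem.Dict Int Int :=
    (PySem.List.enumerate sorted_flat_list).foldl
      (fun d p => d.insert p.2.1 (p.1 + 1)) PySem.Dict.empty
  -- build ranked_2d_list; rank_dict[value] — the key is always present (value came from lst), so getD is exact here
  lst.foldl (fun ranked_2d_list sublist =>
    ranked_2d_list ++ [sublist.foldl (fun ranked_sublist value =>
      ranked_sublist ++ [rank_dict.getD value 0]) []]) []

-- ===== PORT B =====
def flatten_and_rank_alt (lst : List (List Int)) : List (List Int) :=
  -- counts[v] = counts.get(v, 0) + 1 over both loops
  let counts : PySem.Dict Int Int :=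
    lst.foldl (fun d row => row.foldl (fun d v => d.insert v (d.getD v 0 + 1)) d)
      PySem.Dict.empty
  -- total += counts[v]; cum[v] = total   for v in sorted(counts)
  let cum : PySem.Dict Int Int :=
    ((PySem.List.sorted counts.keys (fun x => x) false).foldl
      (fun s v => (s.1 + counts.getD v 0, s.2.insert v (s.1 + counts.getD v 0)))
      ((0 : Int), (PySem.Dict.empty : PySem.Dict Int Int))).2
  -- [[cum[v] for v in row] for row in lst]; the key is always present, so getD is exact here
  lst.map (fun row => row.map (fun v => cum.getD v 0))

-- ===== PRECONDITION & SPEC =====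
def Spec_flatten_and_rank (lst : List (List Int)) (out : List (List Int)) : Prop := out = flatten_and_rank_alt lst
instance (lst : List (List Int)) (out : List (List Int)) : Decidable (Spec_flatten_and_rank lst out) := by unfold Spec_flatten_and_rank; infer_instance

-- ===== CLAIM (what is proved, stated in full; the proofs are below) =====
def Claim_equal_flatten_and_rank : Prop := ∀ (lst : List (List Int)), Dom_flatten_and_rank lst → Spec_flatten_and_rank lst (flatten_and_rank lst)

-- ===== LEMMAS AND PROOFS =====

-- A's side: in a key-nondecreasing list s, the rank dict (value ↦ enumerate-index + 1,
-- last wins) maps a present key v to the number of elements with key ≤ v.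
lemma rank_fold_getD (v : Int) :
    ∀ (s : List (Int × Int × Int)), s.Pairwise (fun a b => a.1 ≤ b.1) → v ∈ s.map (·.1) →
    ((PySem.List.enumerate s).foldl (fun d p => d.insert p.2.1 (p.1 + 1))
        (PySem.Dict.empty : PySem.Dict Int Int)).getD v 0
      = (s.countP (fun x => decide (x.1 ≤ v)) : Int) := by
  intro s
  induction s using List.reverseRecOn with
  | nil => intro _ hv; simp at hv
  | append_singleton s a ih =>
    intro hpw hv
    have hpw' : s.Pairwise (fun a b => a.1 ≤ b.1) := (List.pairwise_append.mp hpw).1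
    have hle : ∀ x ∈ s, x.1 ≤ a.1 := by
      intro x hx
      exact (List.pairwise_append.mp hpw).2.2 x hx a (by simp)
    rw [PySem.List.enumerate_append, List.foldl_append]
    simp only [PySem.List.enumerate_cons, PySem.List.enumerate_nil,
      List.foldl_cons, List.foldl_nil, List.countP_append]
    by_cases hav : a.1 = v
    · -- the final insert wins: rank = |s| + 1; everything in s has key ≤ v
      rw [hav, PySem.Dict.getD_insert_self]
      have hall : s.countP (fun x => decide (x.1 ≤ v)) = s.length := by
        rw [List.countP_eq_length]
        intro x hx; simpa using (hav ▸ hle x hx)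
      simp [hall, hav]
    · -- untouched key: reduce to s; a's key is > v
      rw [PySem.Dict.getD_insert, if_neg (fun h => hav h.symm)]
      have hvs : v ∈ s.map (·.1) := by
        simp only [List.map_append, List.mem_append] at hv
        rcases hv with h | h
        · exact h
        · simp at h; exact absurd h.symm hav
      have hnot : ¬ a.1 ≤ v := by
        intro hle'
        rcases List.mem_map.mp hvs with ⟨x, hx, hxv⟩
        exact hav (le_antisymm hle' (hxv ▸ hle x hx))
      rw [ih hpw' hvs]
      simp [hnot]

-- the flattened values of A's indexed flat list are exactly the flattened values of lst
lemma map_fst_flat (lst : List (List Int)) :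
    ((PySem.List.enumerate lst).flatMap (fun p =>
      (PySem.List.enumerate p.2).map (fun q => (q.2, p.1, q.1)))).map (·.1)
    = lst.flatMap (fun row => row) := by
  rw [List.map_flatMap]
  have h : ∀ (s : Int), ((PySem.List.enumerate lst s).flatMap (fun p =>
      ((PySem.List.enumerate p.2).map (fun q => (q.2, p.1, q.1))).map (·.1)))
      = lst.flatMap (fun row => row) := by
    intro s
    induction lst generalizing s with
    | nil => simp [PySem.List.enumerate_nil]
    | cons hd tl ih =>
      simp only [PySem.List.enumerate_cons, List.flatMap_cons, ih (s + 1)]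
      congr 1
      rw [List.map_map]
      have : ((fun x : Int × Int × Int => x.1) ∘ fun q : Int × Int => (q.2, s, q.1))
          = fun q : Int × Int => q.2 := rfl
      rw [this]
      exact PySem.List.map_snd_enumerate hd 0
  exact h 0

lemma countP_key_flat (lst : List (List Int)) (v : Int) :
    (((PySem.List.enumerate lst).flatMap (fun p =>
       (PySem.List.enumerate p.2).map (fun q => (q.2, p.1, q.1)))).countP
         (fun x => decide (x.1 ≤ v)))
    = (lst.flatMap (fun row => row)).countP (fun x => decide (x ≤ v)) := by
  rw [← map_fst_flat lst, List.countP_map]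
  rfl

-- B's side: a countP over l is the sum, over a duplicate-free cover d of l's elements,
-- of the per-value occurrence counts that satisfy the predicate.
lemma countP_eq_sum_counts (p : Int → Bool) :
    ∀ (d l : List Int), d.Nodup → (∀ x ∈ l, x ∈ d) →
    l.countP p = ((d.filter p).map (fun u => l.count u)).sum := by
  intro d
  induction d with
  | nil =>
    intro l _ hcov
    have : l = [] := List.eq_nil_iff_forall_not_mem.mpr (fun x hx => by simpa using hcov x hx)
    simp [this]
  | cons u d' ih =>
    intro l hnd hcov
    have hund : u ∉ d' := (List.nodup_cons.mp hnd).1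
    have hnd' : d'.Nodup := (List.nodup_cons.mp hnd).2
    -- split l into the copies of u and the rest
    have hcov' : ∀ x ∈ l.filter (fun x => !(x == u)), x ∈ d' := by
      intro x hx
      have hxl := List.mem_of_mem_filter hx
      have hxne : ¬ (x = u) := by
        have := List.of_mem_filter hx; simpa using this
      rcases List.mem_cons.mp (hcov x hxl) with h | h
      · exact absurd h hxne
      · exact h
    have hsplit : l.countP p
        = (l.filter (fun x => x == u)).countP p + (l.filter (fun x => !(x == u))).countP p := by
      rw [← ((List.filter_append_perm (fun x => x == u) l).countP_eq p), List.countP_append]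
    have hcopies : (l.filter (fun x => x == u)).countP p
        = if p u then l.count u else 0 := by
      by_cases hpu : p u = true
      · rw [if_pos hpu, List.countP_filter, List.count_eq_countP]
        apply List.countP_congr
        intro a _
        by_cases h : a = u
        · simp [h, hpu]
        · simp [h]
      · rw [if_neg (by simpa using hpu), List.countP_filter, List.countP_eq_zero]
        intro a _
        by_cases h : a = u
        · simp [h]; simpa using hpu
        · simp [h]
    have hcount_filter : ∀ u' ∈ d', (l.filter (fun x => !(x == u))).count u' = l.count u' := by
      intro u' hu'
      have hne : u' ≠ u := fun h => hund (h ▸ hu')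
      rw [List.count_filter]
      simp [hne]
    by_cases hpu : p u = true
    · simp only [List.filter_cons, hpu, if_pos, List.map_cons, List.sum_cons]
      rw [hsplit, hcopies, if_pos hpu, ih _ hnd' hcov']
      congr 1
      exact congrArg List.sum
        (List.map_congr_left (fun u' hu' => hcount_filter u' (List.mem_of_mem_filter hu')))
    · simp only [List.filter_cons, hpu]
      rw [hsplit, hcopies, if_neg (by simpa using hpu), ih _ hnd' hcov']
      simp only [Nat.zero_add, Bool.false_eq_true, if_false]
      exact congrArg List.sum
        (List.map_congr_left (fun u' hu' => hcount_filter u' (List.mem_of_mem_filter hu')))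

-- the running total of the prefix-sum loop
lemma fst_cumfold (g : Int → Int) :
    ∀ (ks : List Int) (t0 : Int) (d0 : PySem.Dict Int Int),
    (ks.foldl (fun s u => (s.1 + g u, s.2.insert u (s.1 + g u))) (t0, d0)).1
      = t0 + (ks.map g).sum := by
  intro ks
  induction ks with
  | nil => simp
  | cons u ks ih =>
    intro t0 d0
    simp only [List.foldl_cons, List.map_cons, List.sum_cons, ih]
    ring

-- the prefix-sum dict maps a present value v to the sum of g over the values ≤ v
lemma cumfold_getD (g : Int → Int) (v : Int) :
    ∀ (ks : List Int) (t0 : Int) (d0 : PySem.Dict Int Int),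
    ks.Pairwise (· ≤ ·) → v ∈ ks →
    ((ks.foldl (fun s u => (s.1 + g u, s.2.insert u (s.1 + g u))) (t0, d0)).2).getD v 0
      = t0 + ((ks.filter (fun u => u ≤ v)).map g).sum := by
  intro ks
  induction ks using List.reverseRecOn with
  | nil => intro t0 d0 _ hv; simp at hv
  | append_singleton ks a ih =>
    intro t0 d0 hpw hv
    have hpw' : ks.Pairwise (· ≤ ·) := (List.pairwise_append.mp hpw).1
    have hle : ∀ x ∈ ks, x ≤ a := by
      intro x hx
      exact (List.pairwise_append.mp hpw).2.2 x hx a (by simp)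
    rw [List.foldl_append, List.foldl_cons, List.foldl_nil]
    by_cases hav : a = v
    · -- v is the last (largest) value: the whole prefix contributes
      simp only [fst_cumfold]
      have hall : ks.filter (fun u => u ≤ v) = ks :=
        List.filter_eq_self.mpr (fun x hx => by simpa using (hav ▸ hle x hx))
      rw [List.filter_append, hall]
      simp [hav, PySem.Dict.getD_insert_self]
      ring
    · rw [PySem.Dict.getD_insert, if_neg (fun h => hav h.symm)]
      have hvk : v ∈ ks := by
        rcases List.mem_append.mp hv with h | h
        · exact h
        · simp at h; exact absurd h.symm hav
      have hnot : ¬ a ≤ v := fun h => hav (le_antisymm h (hle v hvk))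
      rw [ih t0 d0 hpw' hvk, List.filter_append]
      simp [hnot]

-- ===== VERDICT (by name: the statement is the Claim_ definition above) =====
theorem flatten_and_rank_spec : Claim_equal_flatten_and_rank := by
  unfold Claim_equal_flatten_and_rank
  intro lst _
  unfold Spec_flatten_and_rank flatten_and_rank flatten_and_rank_alt
  simp only [PySem.List.foldl_append_singleton_eq_map, List.nil_append]
  -- B's counter dict is Counter(flat)
  have hcounter : lst.foldl (fun d row => row.foldl
        (fun d v => d.insert v (d.getD v 0 + 1)) d) PySem.Dict.empty
      = PySem.Dict.counter (lst.flatMap (fun row => row)) := by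
    rw [← PySem.Dict.foldl_insert_getD_add_one_eq_counter, List.foldl_flatMap]
  rw [hcounter]
  apply List.map_congr_left
  intro row hrow
  apply List.map_congr_left
  intro v hv
  set flat : List Int := lst.flatMap (fun row => row) with hflat
  have hvflat : v ∈ flat := List.mem_flatMap.mpr ⟨row, hrow, hv⟩
  -- A's cell equals countP (· ≤ v) of flat
  set F : List (Int × Int × Int) := (PySem.List.enumerate lst).flatMap (fun p =>
    (PySem.List.enumerate p.2).map (fun q => (q.2, p.1, q.1))) with hF
  have hmemF : v ∈ F.map (·.1) := by rw [hF, map_fst_flat lst]; exact hvflat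
  have hmemS : v ∈ (PySem.List.sorted F (fun x => x.1) false).map (·.1) := by
    rcases List.mem_map.mp hmemF with ⟨x, hx, hxv⟩
    exact List.mem_map.mpr ⟨x, (PySem.List.mem_sorted F (fun x => x.1) false x).mpr hx, hxv⟩
  rw [rank_fold_getD v _ (by simpa using PySem.List.sorted_pairwise F (fun x => x.1)) hmemS,
    ((PySem.List.sorted_perm F (fun x => x.1) false).countP_eq _), hF, countP_key_flat, ← hflat]
  -- B's cell equals the same countP
  set ks := PySem.List.sorted (PySem.Dict.counter flat).keys (fun x => x) false with hks
  have hkeys : (PySem.Dict.counter flat).keys = PySem.Set.ofList flat :=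
    PySem.Dict.keys_counter flat
  have hperm : ks.Perm (PySem.Set.ofList flat) :=
    hkeys ▸ PySem.List.sorted_perm (PySem.Dict.counter flat).keys (fun x => x) false
  have hvks : v ∈ ks := hperm.mem_iff.mpr ((PySem.Set.mem_ofList flat v).mpr hvflat)
  have hpwks : ks.Pairwise (fun a b => a ≤ b) := by
    rw [hks, hkeys]
    simpa using PySem.List.sorted_pairwise (PySem.Set.ofList flat) (fun x => x)
  rw [cumfold_getD _ v ks 0 PySem.Dict.empty hpwks hvks, zero_add]
  have hg : (ks.filter (fun u => u ≤ v)).map (fun u => (PySem.Dict.counter flat).getD u 0)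
      = (ks.filter (fun u => u ≤ v)).map (fun u => (flat.count u : Int)) :=
    List.map_congr_left (fun u _ => PySem.Dict.getD_counter flat u)
  rw [hg]
  have hpermsum : ((ks.filter (fun u => u ≤ v)).map (fun u => (flat.count u : Int))).sum
      = (((PySem.Set.ofList flat).filter (fun u => u ≤ v)).map (fun u => (flat.count u : Int))).sum :=
    ((hperm.filter (fun u => decide (u ≤ v))).map (fun u => (flat.count u : Int))).sum_eq
  rw [hpermsum]
  have hnat := countP_eq_sum_counts (fun x => decide (x ≤ v)) (PySem.Set.ofList flat) flat
    (PySem.Set.nodup_ofList flat) (fun x hx => (PySem.Set.mem_ofList flat x).mpr hx)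
  have : (((PySem.Set.ofList flat).filter (fun u => u ≤ v)).map (fun u => (flat.count u : Int))).sum
      = ((((PySem.Set.ofList flat).filter (fun u => u ≤ v)).map (fun u => flat.count u)).map
          (fun n : Nat => (n : Int))).sum := by
    rw [List.map_map]; rfl
  rw [this, ← Nat.cast_list_sum, ← hnat]
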